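-- pv_equiv track=rewrite | github.com/yaniv-golan/ostruct | src/ostruct/cli/utils/path_truncation.py | _shrink_filename
-- ===== SOURCE A (Python) =====
-- def _shrink_filename(
--     filename: str,
--     max_length: int,
--     ellipsis: str,
--     preserve_extension: bool = True,
-- ) -> str:
--     """Shrink a filename, optionally preserving the extension."""
--     if len(filename) <= max_length:
--         return filename
--
--     # Handle hidden files (starting with .)
--     if filename.startswith(".") and len(filename) > 1:
--         dot = filename[0]
--         rest = filename[1:]
--         if max_length <= 1:
--             return dot
--         shrunk_rest = _shrink_filename(
--             rest, max_length - 1, ellipsis, preserve_extension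
--         )
--         return dot + shrunk_rest
--
--     if not preserve_extension or "." not in filename:
--         return _truncate_with_custom_ellipsis(filename, max_length, ellipsis)
--
--     # Split filename and extension
--     name_part, ext_part = filename.rsplit(".", 1)
--     ext_with_dot = "." + ext_part
--
--     # NEW: If extension alone is too long, show ellipsis + tail of extension
--     if len(ext_with_dot) >= max_length:
--         if max_length <= len(ellipsis):
--             # Show as much of the extension as possible instead of dropping it
--             return ext_with_dot[-max_length:]  # '.js', '.py', etc.
--         # Show ellipsis + tail of extension: "...py"
--         ext_tail_length = max_length - len(ellipsis)
--         if ext_tail_length > 0: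
--             return ellipsis + ext_with_dot[-ext_tail_length:]
--         else:
--             return ellipsis
--
--     # Shrink name part while preserving extension
--     available_for_name = max_length - len(ext_with_dot)
--     if available_for_name <= len(ellipsis):
--         # Not enough space for meaningful name, but we can still show extension
--         if len(ellipsis) + len(ext_with_dot) <= max_length:
--             return ellipsis + ext_with_dot
--         else:
--             # Fall back to showing ellipsis + extension tail
--             ext_tail_length = max_length - len(ellipsis)
--             return (
--                 ellipsis + ext_with_dot[-ext_tail_length:]
--                 if ext_tail_length > 0
--                 else ellipsis
--             )
--
--     shrunk_name = _truncate_with_custom_ellipsis(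
--         name_part, available_for_name, ellipsis
--     )
--     return shrunk_name + ext_with_dot
--
-- def _truncate_with_custom_ellipsis(
--     text: str, max_width: int, ellipsis: str
-- ) -> str:
--     """Truncate text with custom ellipsis if too long."""
--     if len(text) <= max_width:
--         return text
--     if max_width <= len(ellipsis):
--         return ellipsis if max_width == len(ellipsis) else text[:max_width]
--     return text[: max_width - len(ellipsis)] + ellipsis
-- ===== SOURCE B (Python) =====
-- def _shrink_filename(
--     filename: str,
--     max_length: int,
--     ellipsis: str,
--     preserve_extension: bool = True,
-- ) -> str:
--     """Shrink a filename, optionally preserving the extension.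
--
--     The leading-dot prefix of a hidden file is handled in closed form
--     (count the run of dots once) instead of peeling one dot per recursive call.
--     """
--     L = len(filename)
--     if L <= max_length:
--         return filename
--     # closed form over the leading-dot run of a hidden file
--     run = 0
--     while run < L and filename[run] == ".":
--         run += 1
--     k = max(0, min(run, L - 1))
--     if 0 < k and max_length <= k:
--         return "." * max(max_length, 1)
--     return "." * k + _shrink_tail(
--         filename[k:], max_length - k, ellipsis, preserve_extension
--     )
--
--
-- def _shrink_tail(name: str, m: int, ellipsis: str, preserve_extension: bool) -> str:
--     """Shrink a non-hidden name known to be longer than m."""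
--     e = len(ellipsis)
--     if preserve_extension and "." in name:
--         stem, _, ext = name.rpartition(".")
--         ewd = "." + ext
--         x = len(ewd)
--         if m - x <= e:
--             # extension-dominated: result is built from the ellipsis and ewd only
--             if e < m:
--                 return ellipsis + ewd[x - (m - e):]
--             if x >= m:
--                 return ewd[-m:]
--             return ellipsis
--         body = stem if len(stem) <= m - x else stem[: m - x - e] + ellipsis
--         return body + ewd
--     if m == e:
--         return ellipsis
--     if m <= e:
--         return name[:m]
--     return name[: m - e] + ellipsis
-- ===== Notes on version B (the rewrite author's own statement) =====
-- stated objective: alternative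
-- what changed: The per-dot recursion over a hidden file's leading dots is replaced by a closed form (count the leading-dot run once, emit the dot prefix directly), and the extension-preserving branches are flattened into a single extension-dominated condition (m - len('.'+ext) <= len(ellipsis)) using rpartition instead of rsplit.
import Mathlib
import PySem

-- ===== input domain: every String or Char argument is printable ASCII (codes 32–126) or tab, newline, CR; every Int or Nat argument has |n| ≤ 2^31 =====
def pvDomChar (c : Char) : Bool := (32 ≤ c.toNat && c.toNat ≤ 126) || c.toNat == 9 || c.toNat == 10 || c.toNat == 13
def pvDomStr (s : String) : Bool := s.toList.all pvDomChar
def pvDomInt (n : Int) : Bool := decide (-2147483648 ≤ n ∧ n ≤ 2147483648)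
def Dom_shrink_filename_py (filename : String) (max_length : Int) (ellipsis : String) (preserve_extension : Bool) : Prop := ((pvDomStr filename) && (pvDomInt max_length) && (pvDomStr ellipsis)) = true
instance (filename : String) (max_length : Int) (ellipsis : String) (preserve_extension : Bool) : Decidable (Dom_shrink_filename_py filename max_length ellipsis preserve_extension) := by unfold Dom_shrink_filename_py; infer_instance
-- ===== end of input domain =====

-- B replaces A's per-dot recursion over a hidden file's leading dots by a closed form (count the
-- run once) and flattens the extension-preserving branches into one extension-dominated condition
-- (alternative decomposition, same asymptotic cost).

-- ===== PORT A =====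

def pvTruncA (text : List Char) (maxW : Int) (ell : List Char) : List Char :=
  if (text.length : Int) ≤ maxW then text
  else if maxW ≤ (ell.length : Int) then
    if maxW = (ell.length : Int) then ell else PySem.List.slice text none (some maxW)
  else PySem.List.slice text none (some (maxW - (ell.length : Int))) ++ ell

def pvRsplitDot (cs : List Char) : List Char × List Char :=
  (cs.take (cs.length - cs.reverse.idxOf '.' - 1), cs.drop (cs.length - cs.reverse.idxOf '.'))

def pvShrinkA (cs : List Char) (m : Int) (ell : List Char) (pres : Bool) : List Char :=
  if (cs.length : Int) ≤ m then cs
  else if h : PySem.Chars.startswith cs ['.'] && decide (1 < cs.length) then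
    if m ≤ 1 then cs.take 1
    else cs.take 1 ++ pvShrinkA (cs.drop 1) (m - 1) ell pres
  else if !pres || !(PySem.Chars.isIn ['.'] cs) then
    pvTruncA cs m ell
  else
    if m ≤ ((('.' :: (pvRsplitDot cs).2).length : Int)) then
      if m ≤ (ell.length : Int) then PySem.List.slice ('.' :: (pvRsplitDot cs).2) (some (-m)) none
      else
        if 0 < m - (ell.length : Int) then
          ell ++ PySem.List.slice ('.' :: (pvRsplitDot cs).2) (some (-(m - (ell.length : Int)))) none
        else ell
    else
      if m - ((('.' :: (pvRsplitDot cs).2).length : Int)) ≤ (ell.length : Int) then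
        if (ell.length : Int) + ((('.' :: (pvRsplitDot cs).2).length : Int)) ≤ m then
          ell ++ ('.' :: (pvRsplitDot cs).2)
        else
          if 0 < m - (ell.length : Int) then
            ell ++ PySem.List.slice ('.' :: (pvRsplitDot cs).2) (some (-(m - (ell.length : Int)))) none
          else ell
      else pvTruncA (pvRsplitDot cs).1 (m - ((('.' :: (pvRsplitDot cs).2).length : Int))) ell
            ++ ('.' :: (pvRsplitDot cs).2)
termination_by cs.length
decreasing_by
  simp only [Bool.and_eq_true, decide_eq_true_eq] at h
  simp; omega

def shrink_filename_py (filename : String) (max_length : Int) (ellipsis : String) (preserve_extension : Bool) : String :=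
  String.ofList (pvShrinkA filename.toList max_length ellipsis.toList preserve_extension)

-- ===== PORT B =====

def pvDotRun : List Char → Nat
  | [] => 0
  | c :: rest => if c = '.' then pvDotRun rest + 1 else 0

def pvDots (k : Int) : List Char := List.replicate k.toNat '.'

def pvRpartDot (cs : List Char) : List Char × List Char :=
  (cs.take (cs.length - ((cs.reverse.takeWhile (fun c => !(c == '.'))).reverse).length - 1),
   (cs.reverse.takeWhile (fun c => !(c == '.'))).reverse)

def pvShrinkBTail (name : List Char) (m : Int) (ell : List Char) (pres : Bool) : List Char :=
  if pres && PySem.Chars.isIn ['.'] name then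
    if m - ((('.' :: (pvRpartDot name).2).length : Int)) ≤ (ell.length : Int) then
      if (ell.length : Int) < m then
        ell ++ PySem.List.slice ('.' :: (pvRpartDot name).2)
          (some (((('.' :: (pvRpartDot name).2).length : Int)) - (m - (ell.length : Int)))) none
      else if ((('.' :: (pvRpartDot name).2).length : Int)) ≥ m then
        PySem.List.slice ('.' :: (pvRpartDot name).2) (some (-m)) none
      else ell
    else
      (if (((pvRpartDot name).1.length : Int)) ≤ m - ((('.' :: (pvRpartDot name).2).length : Int)) then
        (pvRpartDot name).1
       else PySem.List.slice (pvRpartDot name).1 none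
          (some (m - ((('.' :: (pvRpartDot name).2).length : Int)) - (ell.length : Int))) ++ ell)
        ++ ('.' :: (pvRpartDot name).2)
  else if m = (ell.length : Int) then ell
  else if m ≤ (ell.length : Int) then PySem.List.slice name none (some m)
  else PySem.List.slice name none (some (m - (ell.length : Int))) ++ ell

def pvShrinkB (cs : List Char) (m : Int) (ell : List Char) (pres : Bool) : List Char :=
  if (cs.length : Int) ≤ m then cs
  else
    if 0 < max 0 (min ((pvDotRun cs : Int)) ((cs.length : Int) - 1))
        ∧ m ≤ max 0 (min ((pvDotRun cs : Int)) ((cs.length : Int) - 1)) then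
      pvDots (max m 1)
    else
      pvDots (max 0 (min ((pvDotRun cs : Int)) ((cs.length : Int) - 1)))
        ++ pvShrinkBTail
            (PySem.List.slice cs (some (max 0 (min ((pvDotRun cs : Int)) ((cs.length : Int) - 1)))) none)
            (m - max 0 (min ((pvDotRun cs : Int)) ((cs.length : Int) - 1))) ell pres

def shrink_filename_py_alt (filename : String) (max_length : Int) (ellipsis : String) (preserve_extension : Bool) : String :=
  String.ofList (pvShrinkB filename.toList max_length ellipsis.toList preserve_extension)

-- ===== PRECONDITION & SPEC =====
def Spec_shrink_filename_py (filename : String) (max_length : Int) (ellipsis : String) (preserve_extension : Bool) (out : String) : Prop := out = shrink_filename_py_alt filename max_length ellipsis preserve_extension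
instance (filename : String) (max_length : Int) (ellipsis : String) (preserve_extension : Bool) (out : String) : Decidable (Spec_shrink_filename_py filename max_length ellipsis preserve_extension out) := by unfold Spec_shrink_filename_py; infer_instance

-- ===== CLAIM (what is proved, stated in full; the proofs are below) =====
def Claim_equal_shrink_filename_py : Prop := ∀ (filename : String) (max_length : Int) (ellipsis : String) (preserve_extension : Bool), Dom_shrink_filename_py filename max_length ellipsis preserve_extension → Spec_shrink_filename_py filename max_length ellipsis preserve_extension (shrink_filename_py filename max_length ellipsis preserve_extension)

-- ===== LEMMAS AND PROOFS =====

theorem rsplit_eq_rpart (cs : List Char) : pvRsplitDot cs = pvRpartDot cs := by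
  unfold pvRsplitDot pvRpartDot
  have hfle := List.findIdx_le_length (p := fun x => x == '.') (xs := cs.reverse)
  have hfind : (cs.reverse.takeWhile (fun c => !(c == '.'))).length
      = cs.reverse.findIdx (fun x => x == '.') := by
    rw [List.takeWhile_eq_take_findIdx_not, List.length_take]
    simp only [Bool.not_not]
    omega
  set n := (cs.reverse.takeWhile (fun c => !(c == '.'))).length with hn
  have htake : cs.reverse.takeWhile (fun c => !(c == '.')) = cs.reverse.take n := by
    conv_lhs => rw [List.takeWhile_eq_take_findIdx_not]
    rw [hfind]
    simp only [Bool.not_not]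
  have hext : (cs.reverse.takeWhile (fun c => !(c == '.'))).reverse = cs.drop (cs.length - n) := by
    rw [htake, List.take_reverse, List.reverse_reverse]
  have hidx : cs.reverse.idxOf '.' = n := by
    rw [List.idxOf, hfind]
  refine Prod.ext ?_ ?_
  · simp only [hidx, hext, List.length_drop]
    try congr 1
    try omega
  · rw [hidx]
    exact hext.symm

theorem slice_neg_eq (E : List Char) (t : Int) (h0 : 0 < t) (hx : t ≤ (E.length : Int)) :
    PySem.List.slice E (some (-t)) none = PySem.List.slice E (some ((E.length : Int) - t)) none := by
  obtain ⟨k, rfl⟩ : ∃ k : Nat, t = (k : Int) := ⟨t.toNat, by omega⟩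
  rw [PySem.List.slice_from_neg_natCast _ _ (by exact_mod_cast h0)]
  rw [PySem.List.slice_from _ (by omega)]
  congr 1; omega

theorem tail_eq (name : List Char) (m : Int) (ell : List Char) (pres : Bool)
    (hlen : ¬ (name.length : Int) ≤ m)
    (hnh : ¬ (PySem.Chars.startswith name ['.'] && decide (1 < name.length)) = true) :
    pvShrinkA name m ell pres = pvShrinkBTail name m ell pres := by
  rw [pvShrinkA, if_neg hlen, dif_neg hnh, pvShrinkBTail]
  by_cases hin : (pres && PySem.Chars.isIn ['.'] name) = true
  · have hA : (!pres || !(PySem.Chars.isIn ['.'] name)) = false := by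
      simp only [Bool.and_eq_true] at hin
      simp [hin.1, hin.2]
    rw [if_neg (by simp [hA]), if_pos hin, rsplit_eq_rpart]
    have he0 : (0:Int) ≤ (ell.length : Int) := by positivity
    have hx1 : (1:Int) ≤ ((('.' :: (pvRpartDot name).2).length : Int)) := by
      simp
    simp only [pvTruncA]
    split_ifs <;>
      first
        | rfl
        | omega
        | (congr 1
           first
             | (rw [slice_neg_eq _ (m - (ell.length : Int)) (by omega) (by omega)])
             | (have h0 : ((('.' :: (pvRpartDot name).2).length : Int)) - (m - (ell.length : Int)) = 0 := by
                  omega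
                rw [h0, PySem.List.slice_from _ (by omega)]
                simp))
  · have hA : (!pres || !(PySem.Chars.isIn ['.'] name)) = true := by
      simp only [Bool.and_eq_true, not_and_or] at hin
      rcases hin with h | h <;> simp [Bool.eq_false_iff.mpr h]
    rw [if_pos hA, if_neg hin]
    simp only [pvTruncA]
    rw [if_neg hlen]
    split_ifs <;> first | rfl | omega

theorem B_cons (rest : List Char) (m : Int) (ell : List Char) (pres : Bool)
    (hrest : rest ≠ []) (hm1 : 1 < m) (hm : ¬ ((('.' :: rest).length : Int) ≤ m)) :
    pvShrinkB ('.' :: rest) m ell pres = '.' :: pvShrinkB rest (m - 1) ell pres := by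
  have hL : 1 ≤ rest.length := by cases rest <;> simp_all
  have hm' : ¬ ((rest.length : Int) ≤ m - 1) := by
    simp only [List.length_cons] at hm
    push_cast at hm ⊢
    omega
  have hrun : pvDotRun ('.' :: rest) = pvDotRun rest + 1 := by simp [pvDotRun]
  set k' := max 0 (min ((pvDotRun rest : Int)) ((rest.length : Int) - 1)) with hk'
  have hk'0 : 0 ≤ k' := by omega
  have hk : max 0 (min ((pvDotRun ('.' :: rest) : Int)) ((('.' :: rest).length : Int) - 1)) = k' + 1 := by
    rw [hrun, hk']
    simp only [List.length_cons]
    push_cast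
    omega
  rw [pvShrinkB, pvShrinkB, if_neg hm, if_neg hm', hk, ← hk']
  by_cases hc : 0 < k' ∧ m - 1 ≤ k'
  · have hcL : 0 < k' + 1 ∧ m ≤ k' + 1 := by omega
    rw [if_pos hcL, if_pos hc]
    unfold pvDots
    have h1 : (max m 1).toNat = (max (m - 1) 1).toNat + 1 := by omega
    rw [h1, List.replicate_succ]
  · have hcL : ¬ (0 < k' + 1 ∧ m ≤ k' + 1) := by omega
    rw [if_neg hcL, if_neg hc]
    have hslice : PySem.List.slice ('.' :: rest) (some (k' + 1)) none
        = PySem.List.slice rest (some k') none := by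
      rw [PySem.List.slice_from _ (by omega), PySem.List.slice_from _ hk'0]
      have h2 : (k' + 1).toNat = k'.toNat + 1 := by omega
      rw [h2]
      rfl
    rw [hslice]
    have hmm : m - (k' + 1) = m - 1 - k' := by ring
    rw [hmm]
    unfold pvDots
    have h2 : (k' + 1).toNat = k'.toNat + 1 := by omega
    rw [h2, List.replicate_succ]
    simp

theorem shrink_eq (cs : List Char) (m : Int) (ell : List Char) (pres : Bool) :
    pvShrinkA cs m ell pres = pvShrinkB cs m ell pres := by
  induction cs generalizing m with
  | nil =>
    by_cases hm : ((([] : List Char).length : Int) ≤ m)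
    · rw [pvShrinkA, pvShrinkB, if_pos hm, if_pos hm]
    · rw [tail_eq _ _ _ _ hm (by simp [PySem.Chars.startswith])]
      rw [pvShrinkB, if_neg hm]
      have hk : max 0 (min ((pvDotRun ([] : List Char) : Int)) (((([] : List Char).length) : Int) - 1)) = 0 := by
        simp [pvDotRun]
      rw [hk, if_neg (by omega), PySem.List.slice_from _ (by omega)]
      simp [pvDots]
  | cons c rest ih =>
    by_cases hm : (((c :: rest).length : Int) ≤ m)
    · rw [pvShrinkA, pvShrinkB, if_pos hm, if_pos hm]
    · by_cases hdot : c = '.' ∧ rest ≠ []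
      · obtain ⟨rfl, hrest⟩ := hdot
        have hL : 1 ≤ rest.length := by cases rest <;> simp_all
        have hsw : (PySem.Chars.startswith ('.' :: rest) ['.'] && decide (1 < ('.' :: rest).length)) = true := by
          simp only [Bool.and_eq_true, decide_eq_true_eq]
          refine ⟨?_, by simp; omega⟩
          rw [PySem.Chars.startswith_iff]
          exact ⟨rest, rfl⟩
        rw [pvShrinkA, if_neg hm, dif_pos hsw]
        by_cases hm1 : m ≤ 1
        · rw [if_pos hm1, pvShrinkB, if_neg hm]
          have hrun : pvDotRun ('.' :: rest) = pvDotRun rest + 1 := by simp [pvDotRun]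
          have hkpos : 0 < max 0 (min ((pvDotRun ('.' :: rest) : Int)) ((('.' :: rest).length : Int) - 1))
              ∧ m ≤ max 0 (min ((pvDotRun ('.' :: rest) : Int)) ((('.' :: rest).length : Int) - 1)) := by
            rw [hrun]
            simp only [List.length_cons]
            push_cast
            omega
          rw [if_pos hkpos]
          have h1 : max m 1 = 1 := by omega
          rw [h1]
          simp [pvDots, List.take]
        · have hdrop : List.drop 1 ('.' :: rest) = rest := rfl
          rw [if_neg hm1, B_cons rest m ell pres hrest (by omega) hm, hdrop, ih (m - 1)]
          simp [List.take]
      · have hnh : ¬ (PySem.Chars.startswith (c :: rest) ['.'] && decide (1 < (c :: rest).length)) = true := by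
          intro h
          simp only [Bool.and_eq_true, decide_eq_true_eq] at h
          obtain ⟨h1, h2⟩ := h
          rw [PySem.Chars.startswith_iff] at h1
          obtain ⟨t, ht⟩ := h1
          exact hdot ⟨(List.cons_eq_cons.mp ht.symm).1, by intro hre; subst hre; simp at h2⟩
        rw [tail_eq _ _ _ _ hm hnh, pvShrinkB, if_neg hm]
        have hk : max 0 (min ((pvDotRun (c :: rest) : Int)) (((c :: rest).length : Int) - 1)) = 0 := by
          by_cases hc : c = '.'
          · subst hc
            have hre : rest = [] := by by_contra h; exact hdot ⟨rfl, h⟩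
            subst hre
            simp [pvDotRun]
          · simp [pvDotRun, hc]
        rw [hk, if_neg (by omega), PySem.List.slice_from _ (by omega)]
        simp [pvDots]

-- ===== VERDICT (by name: the statement is the Claim_ definition above) =====
theorem shrink_filename_py_spec : Claim_equal_shrink_filename_py := by
  intro f m ell p _
  unfold Spec_shrink_filename_py shrink_filename_py shrink_filename_py_alt
  rw [shrink_eq]
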